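-- pv_equiv track=rewrite | github.com/Jiahaou/- | test.py | create_uni_bi_tri
-- ===== SOURCE A (Python) =====
-- def create_uni_bi_tri(values):
--     left_once = list(values)
--     left_twice = list(values)
--     for i in range(1):
--         left_once.insert(len(left_once), left_once[0])
--         left_once.remove(left_once[0])
--     for i in range(2):
--         left_twice.insert(len(left_twice), left_twice[0])
--         left_twice.remove(left_twice[0])
--     bigram = []
--     trigram = []
--     for i in range(0, len(values)):
--         bigram.append(values[i] + left_once[i])
--         trigram.append(values[i] + left_once[i] + left_twice[i])
--     output = values + bigram + trigram
--     return output
-- ===== SOURCE B (Python) =====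
-- def create_uni_bi_tri(values):
--     ext = values + values + values
--     n = len(values)
--     out = []
--     for k in (1, 2, 3):
--         for i in range(n):
--             out.append(''.join(ext[i:i + k]))
--     return out
-- ===== Notes on version B (the rewrite author's own statement) =====
-- stated objective: alternative
-- what changed: B drops A's rotated-copy construction and separate bigram/trigram loops entirely: it triples the list once and runs one generic k-gram pass (k = 1, 2, 3) that joins the sliding window ext[i:i+k] into a single output accumulator, so unigrams, bigrams and trigrams all come from the same window-join code.
-- crash fix: On the empty list A raises IndexError (left_once[0] on an empty list) while B returns the empty list. — e.g. on create_uni_bi_tri([]): A raises IndexError, B returns []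
import Mathlib
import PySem

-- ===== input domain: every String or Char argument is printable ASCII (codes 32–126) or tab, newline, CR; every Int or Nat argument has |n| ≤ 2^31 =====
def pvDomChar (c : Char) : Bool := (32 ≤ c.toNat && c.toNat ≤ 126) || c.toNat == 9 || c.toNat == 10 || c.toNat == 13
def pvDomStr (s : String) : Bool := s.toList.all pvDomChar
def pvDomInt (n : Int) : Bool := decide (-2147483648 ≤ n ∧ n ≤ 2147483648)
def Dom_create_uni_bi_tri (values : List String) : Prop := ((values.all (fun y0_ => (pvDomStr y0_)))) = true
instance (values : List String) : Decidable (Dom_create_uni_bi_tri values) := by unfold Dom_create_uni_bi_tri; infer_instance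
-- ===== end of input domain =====

-- B replaces A's rotated copies and per-order loops by one generic k-gram pass: it triples
-- the list once and emits ''.join of the sliding window ext[i:i+k] for k = 1, 2, 3 into a
-- single output accumulator (objective: simpler).

-- ===== PORT A =====
-- one body of A's rotation loops: xs.insert(len(xs), xs[0]); xs.remove(xs[0])
def pyRotate (xs : List String) : List String :=
  match PySem.List.pyGet? xs 0 with
  | none => xs   -- Python raises IndexError here (empty list; excluded by Pre_)
  | some h =>
    let ys := PySem.List.insert xs (PySem.List.len xs) h
    match PySem.List.remove? ys h with
    | none => ys   -- unreachable: h was just appended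
    | some zs => zs

def create_uni_bi_tri (values : List String) : List String :=
  let left_once := (PySem.List.pyRange 0 1).foldl (fun acc _ => pyRotate acc) values
  let left_twice := (PySem.List.pyRange 0 2).foldl (fun acc _ => pyRotate acc) values
  let p := (PySem.List.pyRange 0 (PySem.List.len values)).foldl
    (fun (p : List String × List String) i =>
      (p.1 ++ [PySem.List.pyGetD values i "" ++ PySem.List.pyGetD left_once i ""],
       p.2 ++ [PySem.List.pyGetD values i "" ++ PySem.List.pyGetD left_once i "" ++
               PySem.List.pyGetD left_twice i ""]))
    ([], [])
  values ++ p.1 ++ p.2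

-- ===== PORT B =====
def create_uni_bi_tri_alt (values : List String) : List String :=
  let ext := (values ++ values) ++ values
  let n := PySem.List.len values
  ([(1 : Int), 2, 3]).foldl (fun out k =>
    (PySem.List.pyRange 0 n).foldl (fun out i =>
      out ++ [PySem.Str.join "" (PySem.List.slice ext (some i) (some (i + k)))]) out) []

-- ===== PRECONDITION & SPEC =====
-- A raises IndexError on the empty list (left_once[0]); Pre_ excludes exactly that input.
def Pre_create_uni_bi_tri (values : List String) : Prop := values ≠ []
instance (values : List String) : Decidable (Pre_create_uni_bi_tri values) := by
  unfold Pre_create_uni_bi_tri; infer_instance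
def pvWitness_create_uni_bi_tri : List String := ["a", "b"]

-- On the empty list A raises IndexError (left_once[0] on an empty list) while B returns the empty list.
def Raises_create_uni_bi_tri (values : List String) : Prop := values = []
instance (values : List String) : Decidable (Raises_create_uni_bi_tri values) := by
  unfold Raises_create_uni_bi_tri; infer_instance
def pvRaiseWitness_create_uni_bi_tri : List String := []
def pvRaiseWitnessOut_create_uni_bi_tri : List String := []

def Spec_create_uni_bi_tri (values : List String) (out : List String) : Prop := out = create_uni_bi_tri_alt values
instance (values : List String) (out : List String) : Decidable (Spec_create_uni_bi_tri values out) := by unfold Spec_create_uni_bi_tri; infer_instance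

-- ===== CLAIM (what is proved, stated in full; the proofs are below) =====
def Claim_equal_create_uni_bi_tri : Prop := ∀ (values : List String), Dom_create_uni_bi_tri values → Pre_create_uni_bi_tri values → Spec_create_uni_bi_tri values (create_uni_bi_tri values)
def Claim_raises_create_uni_bi_tri : Prop := (∀ (values : List String), Dom_create_uni_bi_tri values → Raises_create_uni_bi_tri values → ¬ Pre_create_uni_bi_tri values) ∧ (Dom_create_uni_bi_tri (pvRaiseWitness_create_uni_bi_tri) ∧ Raises_create_uni_bi_tri (pvRaiseWitness_create_uni_bi_tri) ∧ create_uni_bi_tri_alt (pvRaiseWitness_create_uni_bi_tri) = pvRaiseWitnessOut_create_uni_bi_tri)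

-- ===== LEMMAS AND PROOFS =====

-- the common canonical form both ports are reduced to
def canonBi (values : List String) (i : Int) : String :=
  PySem.List.pyGetD values i "" ++
    PySem.List.pyGetD values (PySem.Int.mod (i + 1) (values.length : Int)) ""

def canonTri (values : List String) (i : Int) : String :=
  PySem.List.pyGetD values i "" ++
    PySem.List.pyGetD values (PySem.Int.mod (i + 1) (values.length : Int)) "" ++
    PySem.List.pyGetD values (PySem.Int.mod (i + 2) (values.length : Int)) ""

def canon (values : List String) : List String :=
  values ++ (PySem.List.pyRange 0 (values.length : Int)).map (canonBi values) ++
    (PySem.List.pyRange 0 (values.length : Int)).map (canonTri values)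

-- ---------- A side ----------

theorem pyRotate_cons (h : String) (t : List String) : pyRotate (h :: t) = t ++ [h] := by
  have hg : PySem.List.pyGet? (h :: t) 0 = some h := by simp [pysem]
  have hins : PySem.List.insert (h :: t) (PySem.List.len (h :: t)) h = (h :: t) ++ [h] :=
    PySem.List.insert_len _ _
  simp only [pyRotate, hg, hins, List.cons_append, PySem.List.remove?_cons_self]

theorem pyRotate_length (xs : List String) : (pyRotate xs).length = xs.length := by
  cases xs with
  | nil => rfl
  | cons h t => simp [pyRotate_cons]

theorem pyRotate_ne_nil (xs : List String) (hne : xs ≠ []) : pyRotate xs ≠ [] := by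
  intro hcon
  have := pyRotate_length xs
  rw [hcon] at this
  exact hne (List.eq_nil_of_length_eq_zero this.symm)

-- one rotation reads like a +1 modular index
theorem rot_getD (xs : List String) (hne : xs ≠ []) (i : Int)
    (h0 : 0 ≤ i) (hlt : i < (xs.length : Int)) :
    PySem.List.pyGetD (pyRotate xs) i "" =
      PySem.List.pyGetD xs (PySem.Int.mod (i + 1) (xs.length : Int)) "" := by
  cases xs with
  | nil => exact absurd rfl hne
  | cons h t =>
    rw [pyRotate_cons]
    have hn : (0 : Int) < ((h :: t).length : Int) := by simp
    rw [PySem.Int.mod_eq_emod_of_pos hn]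
    by_cases hlast : i + 1 < ((h :: t).length : Int)
    · have hmod : (i + 1) % ((h :: t).length : Int) = i + 1 := Int.emod_eq_of_lt (by omega) hlast
      rw [hmod]
      rw [PySem.List.pyGetD_eq_getElem _ "" h0 (by simp at hlt ⊢; omega),
          PySem.List.pyGetD_eq_getElem _ "" (by omega) hlast]
      have hi : i.toNat < t.length := by simp at hlast; omega
      have h1 : (i + 1).toNat = i.toNat + 1 := by omega
      apply Option.some.inj
      rw [← List.getElem?_eq_getElem, ← List.getElem?_eq_getElem, h1]
      rw [List.getElem?_append_left hi, List.getElem?_cons_succ]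
    · have hi : i = (t.length : Int) := by simp at hlt hlast; omega
      have hmod : (i + 1) % ((h :: t).length : Int) = 0 := by
        simp [hi]
      rw [hmod]
      rw [PySem.List.pyGetD_eq_getElem _ "" h0 (by simp [hi]),
          PySem.List.pyGetD_eq_getElem _ "" (by omega) hn]
      have : i.toNat = t.length := by omega
      simp [this]

-- two rotations read like a +2 modular index
theorem rot2_getD (xs : List String) (hne : xs ≠ []) (i : Int)
    (h0 : 0 ≤ i) (hlt : i < (xs.length : Int)) :
    PySem.List.pyGetD (pyRotate (pyRotate xs)) i "" =
      PySem.List.pyGetD xs (PySem.Int.mod (i + 2) (xs.length : Int)) "" := by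
  have hn : (0 : Int) < (xs.length : Int) := by
    cases xs with
    | nil => exact absurd rfl hne
    | cons h t => simp
  have h1 := rot_getD (pyRotate xs) (pyRotate_ne_nil xs hne) i h0
    (by rw [pyRotate_length]; exact hlt)
  rw [pyRotate_length] at h1
  rw [h1]
  have hm0 : 0 ≤ PySem.Int.mod (i + 1) (xs.length : Int) := PySem.Int.mod_nonneg _ hn
  have hmlt : PySem.Int.mod (i + 1) (xs.length : Int) < (xs.length : Int) := PySem.Int.mod_lt _ hn
  rw [rot_getD xs hne _ hm0 hmlt]
  congr 1
  rw [PySem.Int.mod_eq_emod_of_pos hn, PySem.Int.mod_eq_emod_of_pos hn,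
      PySem.Int.mod_eq_emod_of_pos hn]
  conv_rhs => rw [show i + 2 = (i + 1) + 1 by ring]
  rw [Int.add_emod (i+1) 1, Int.add_emod ((i+1) % _) 1, Int.emod_emod_of_dvd _ dvd_rfl]

theorem A_eq_canon (values : List String) (hpre : values ≠ []) :
    create_uni_bi_tri values = canon values := by
  unfold create_uni_bi_tri canon
  have hr1 : PySem.List.pyRange 0 1 = [0] := by decide
  have hr2 : PySem.List.pyRange 0 2 = [0, 1] := by decide
  rw [hr1, hr2]
  simp only [List.foldl_cons, List.foldl_nil]
  rw [PySem.List.foldl_prod_mk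
        (fun acc i => acc ++ [PySem.List.pyGetD values i "" ++ PySem.List.pyGetD (pyRotate values) i ""])
        (fun acc i => acc ++ [PySem.List.pyGetD values i "" ++ PySem.List.pyGetD (pyRotate values) i "" ++
               PySem.List.pyGetD (pyRotate (pyRotate values)) i ""])]
  rw [PySem.List.foldl_append_singleton_eq_map, PySem.List.foldl_append_singleton_eq_map]
  simp only [List.nil_append, PySem.List.len]
  congr 1
  congr 1
  · apply List.map_congr_left
    intro i hi
    obtain ⟨h0, hlt⟩ := PySem.List.mem_pyRange_one.mp hi
    rw [canonBi, rot_getD values hpre i h0 hlt]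
  · apply List.map_congr_left
    intro i hi
    obtain ⟨h0, hlt⟩ := PySem.List.mem_pyRange_one.mp hi
    rw [canonTri, rot_getD values hpre i h0 hlt, rot2_getD values hpre i h0 hlt]

-- ---------- B side ----------

-- indexing the tripled list is modular indexing of the original
theorem ext_getElem? (xs : List String) (m : Nat) (h : m < 3 * xs.length) :
    ((xs ++ xs) ++ xs)[m]? = xs[m % xs.length]? := by
  by_cases h1 : m < xs.length
  · rw [List.getElem?_append_left (by simp; omega), List.getElem?_append_left h1,
        Nat.mod_eq_of_lt h1]
  · by_cases h2 : m < 2 * xs.length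
    · rw [List.getElem?_append_left (by simp; omega), List.getElem?_append_right (by omega)]
      have hm : m % xs.length = m - xs.length := by
        conv_lhs => rw [show m = xs.length + (m - xs.length) by omega]
        rw [Nat.add_mod_left, Nat.mod_eq_of_lt (by omega)]
      rw [hm]
    · rw [List.getElem?_append_right (by simp; omega)]
      have hm : m % xs.length = m - (xs ++ xs).length := by
        simp only [List.length_append]
        conv_lhs => rw [show m = xs.length + (xs.length + (m - (xs.length + xs.length))) by omega]
        rw [Nat.add_mod_left, Nat.add_mod_left, Nat.mod_eq_of_lt (by omega)]
      rw [hm]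

theorem ext_getElem (xs : List String) (m : Nat) (h : m < 3 * xs.length) :
    ((xs ++ xs) ++ xs)[m]'(by simp; omega) = xs[m % xs.length]'(Nat.mod_lt _ (by omega)) := by
  have h' := ext_getElem? xs m h
  rw [List.getElem?_eq_getElem (by simp; omega), List.getElem?_eq_getElem (Nat.mod_lt _ (by omega))] at h'
  exact Option.some.inj h'

-- the modular pyGetD of A's canonical form, written with Nat indices
theorem getD_mod (xs : List String) (hne : xs ≠ []) (m : Nat) :
    PySem.List.pyGetD xs (PySem.Int.mod ((m : Nat) : Int) (xs.length : Int)) "" =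
      xs[m % xs.length]'(Nat.mod_lt _ (List.length_pos_of_ne_nil hne)) := by
  have hn : (0 : Int) < (xs.length : Int) := by
    exact_mod_cast List.length_pos_of_ne_nil hne
  rw [PySem.Int.mod_eq_emod_of_pos hn]
  rw [show ((m : Nat) : Int) % ((xs.length : Nat) : Int) = (((m % xs.length : Nat)) : Int) from
        (Int.natCast_mod m xs.length).symm]
  rw [PySem.List.pyGetD_natCast]
  exact List.getD_eq_getElem xs "" (Nat.mod_lt _ (List.length_pos_of_ne_nil hne))

theorem B_eq_canon (values : List String) (hpre : values ≠ []) :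
    create_uni_bi_tri_alt values = canon values := by
  have hnpos : 0 < values.length := List.length_pos_of_ne_nil hpre
  unfold create_uni_bi_tri_alt canon
  simp only [List.foldl_cons, List.foldl_nil, PySem.List.len]
  rw [PySem.List.foldl_append_singleton_eq_map, PySem.List.foldl_append_singleton_eq_map,
      PySem.List.foldl_append_singleton_eq_map]
  simp only [List.nil_append]
  -- reduce each window to its elements
  have key : ∀ (k : Nat), 0 < k → k ≤ 3 → ∀ i ∈ PySem.List.pyRange 0 (values.length : Int) 1,
      PySem.List.slice ((values ++ values) ++ values) (some i) (some (i + (k : Int))) =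
        (List.range k).map (fun j =>
          values[(i.toNat + j) % values.length]'(Nat.mod_lt _ hnpos)) := by
    intro k hk0 hk3 i hi
    obtain ⟨h0, hlt⟩ := PySem.List.mem_pyRange_one.mp hi
    have hm : i.toNat < values.length := by omega
    rw [PySem.List.slice_toNat _ h0 (by omega)]
    have htn : ((i + (k : Int)).toNat - i.toNat) = k := by omega
    rw [htn]
    apply List.ext_getElem
    · simp only [List.length_take, List.length_drop, List.length_map, List.length_range]
      simp only [List.length_append]; omega
    · intro j hj1 hj2
      simp only [List.length_take, List.length_drop, List.length_append] at hj1
      have hjk : j < k := by omega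
      have hjext : i.toNat + j < 3 * values.length := by omega
      rw [List.getElem_take, List.getElem_drop]
      rw [List.getElem_map]
      simp only [List.getElem_range]
      exact ext_getElem values (i.toNat + j) hjext
  congr 1
  · -- values and bigram blocks
    congr 1
    · -- unigram block: join of the 1-windows is values itself
      have huni : ∀ i ∈ PySem.List.pyRange 0 (values.length : Int) 1,
          PySem.Str.join "" (PySem.List.slice ((values ++ values) ++ values) (some i) (some (i + 1))) =
            PySem.List.pyGetD values i "" := by
        intro i hi
        obtain ⟨h0, hlt⟩ := PySem.List.mem_pyRange_one.mp hi
        have hm : i.toNat < values.length := by omega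
        have hk := key 1 (by omega) (by omega) i hi
        push_cast at hk
        rw [hk]
        simp only [List.range_succ, List.range_zero, List.nil_append, List.map_cons, List.map_nil]
        rw [PySem.List.pyGetD_eq_getElem _ "" h0 hlt]
        rw [PySem.Str.join]
        simp only [List.map_cons, List.map_nil, PySem.Chars.join_singleton]
        simp [Nat.mod_eq_of_lt hm, String.ofList]
      rw [List.map_congr_left huni, PySem.List.map_pyGetD_pyRange_zero' values ""]
    · -- bigram block
      apply List.map_congr_left
      intro i hi
      obtain ⟨h0, hlt⟩ := PySem.List.mem_pyRange_one.mp hi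
      have hm : i.toNat < values.length := by omega
      have hk := key 2 (by omega) (by omega) i hi
      push_cast at hk
      rw [hk]
      simp only [List.range_succ, List.range_zero, List.nil_append, List.map_append, List.map_cons,
        List.map_nil]
      rw [canonBi]
      rw [PySem.List.pyGetD_eq_getElem _ "" h0 hlt]
      have e1 : i + 1 = (((i.toNat + 1 : Nat)) : Int) := by omega
      rw [e1, getD_mod values hpre (i.toNat + 1)]
      rw [PySem.Str.join]
      simp only [List.map_cons, List.map_nil, List.nil_append, List.cons_append]
      rw [PySem.Chars.join_cons_cons, PySem.Chars.join_singleton]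
      simp [Nat.mod_eq_of_lt hm]
  · -- trigram block
    apply List.map_congr_left
    intro i hi
    obtain ⟨h0, hlt⟩ := PySem.List.mem_pyRange_one.mp hi
    have hm : i.toNat < values.length := by omega
    have hk := key 3 (by omega) (by omega) i hi
    push_cast at hk
    rw [hk]
    simp only [List.range_succ, List.range_zero, List.nil_append, List.map_append, List.map_cons,
      List.map_nil]
    rw [canonTri]
    rw [PySem.List.pyGetD_eq_getElem _ "" h0 hlt]
    have e1 : i + 1 = (((i.toNat + 1 : Nat)) : Int) := by omega
    have e2 : i + 2 = (((i.toNat + 2 : Nat)) : Int) := by omega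
    rw [e1, getD_mod values hpre (i.toNat + 1), e2, getD_mod values hpre (i.toNat + 2)]
    rw [PySem.Str.join]
    simp only [List.map_cons, List.map_nil, List.nil_append, List.cons_append]
    rw [PySem.Chars.join_cons_cons, PySem.Chars.join_cons_cons, PySem.Chars.join_singleton]
    simp [Nat.mod_eq_of_lt hm]
    rw [String.append_assoc]

-- ===== VERDICT (by name: the statement is the Claim_ definition above) =====
theorem create_uni_bi_tri_spec : Claim_equal_create_uni_bi_tri := by
  intro values _ hpre
  unfold Spec_create_uni_bi_tri
  rw [A_eq_canon values hpre, B_eq_canon values hpre]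

@[simp] theorem create_uni_bi_tri_raises : Claim_raises_create_uni_bi_tri := by
  unfold Claim_raises_create_uni_bi_tri
  constructor
  · intro values _ hr hpre
    exact hpre hr
  · exact ⟨by decide, by decide, by decide⟩
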